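-- pv_equiv track=rewrite | github.com/JustBeYou/unibuc-master-ai | natural_language_processing/lab2_left_corner_parser.py | build_left_corner_table
-- ===== SOURCE A (Python) =====
-- def build_left_corner_table(grammar):
--     table = {}
--
--     for symbol in grammar:
--         if symbol not in table:
--             table[symbol] = set()
--
--         for production in grammar[symbol]['productions']:
--             table[symbol].add(production[0])
--
--     reverse_table = {}
--     for symbol in table:
--         for production in table[symbol]:
--             if production not in reverse_table:
--                 reverse_table[production] = set()
--
--             reverse_table[production].add(symbol)
--
--     return table, reverse_table
-- ===== SOURCE B (Python) =====
-- def build_left_corner_table(grammar):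
--     table = {}
--     reverse_table = {}
--
--     for symbol, info in grammar.items():
--         corners = table.setdefault(symbol, set())
--         for production in info['productions']:
--             corner = production[0]
--             corners.add(corner)
--             reverse_table.setdefault(corner, set()).add(symbol)
--
--     return table, reverse_table
-- ===== Notes on version B (the rewrite author's own statement) =====
-- stated objective: simpler
-- what changed: Builds the table and the reverse table together in a single pass over grammar.items() using setdefault, dropping A's separate second loop that re-scans the finished table to derive the reverse mapping.
import Mathlib
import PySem

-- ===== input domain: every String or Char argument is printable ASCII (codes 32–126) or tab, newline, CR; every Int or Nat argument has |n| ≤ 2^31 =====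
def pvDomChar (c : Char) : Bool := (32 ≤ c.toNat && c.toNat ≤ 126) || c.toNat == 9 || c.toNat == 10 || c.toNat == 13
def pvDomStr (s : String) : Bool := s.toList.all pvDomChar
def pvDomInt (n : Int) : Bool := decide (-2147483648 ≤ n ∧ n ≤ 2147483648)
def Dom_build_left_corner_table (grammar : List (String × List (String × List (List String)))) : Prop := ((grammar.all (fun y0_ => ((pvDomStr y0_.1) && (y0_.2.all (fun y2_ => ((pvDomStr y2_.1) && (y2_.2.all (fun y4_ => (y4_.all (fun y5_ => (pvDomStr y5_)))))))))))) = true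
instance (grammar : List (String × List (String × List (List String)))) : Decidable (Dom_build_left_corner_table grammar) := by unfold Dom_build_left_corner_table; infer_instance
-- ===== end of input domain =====

-- B builds the table and its reverse together in ONE pass over the grammar (A re-scans the
-- finished table in a second pass); same return value, stated for grammars where every symbol's
-- dict has a 'productions' key and no production is empty (otherwise Python A raises).


-- ===== PORT A =====
def build_left_corner_table (grammar : List (String × List (String × List (List String)))) :
    (List (String × List String)) × (List (String × List String)) :=
  let g : PySem.Dict String (List (String × List (List String))) := PySem.Dict.ofList grammar
  let table : PySem.Dict String (PySem.Set String) :=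
    g.keys.foldl (fun table symbol =>
      let table := if table.contains symbol then table else table.insert symbol PySem.Set.empty
      ((PySem.Dict.ofList ((g.get? symbol).getD [])).getD "productions" []).foldl
        (fun table production =>
          table.modify symbol PySem.Set.empty
            (fun st => PySem.Set.add st ((PySem.List.pyGet? production 0).getD "")))
        table)
      PySem.Dict.empty
  let reverse_table : PySem.Dict String (PySem.Set String) :=
    table.keys.foldl (fun rt symbol =>
      ((table.get? symbol).getD PySem.Set.empty).foldl (fun rt production =>
        let rt := if rt.contains production then rt else rt.insert production PySem.Set.empty
        rt.modify production PySem.Set.empty (fun st => PySem.Set.add st symbol))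
        rt)
      PySem.Dict.empty
  (table.items, reverse_table.items)

-- ===== PORT B =====
def build_left_corner_table_alt (grammar : List (String × List (String × List (List String)))) :
    (List (String × List String)) × (List (String × List String)) :=
  let g : PySem.Dict String (List (String × List (List String))) := PySem.Dict.ofList grammar
  let tr : PySem.Dict String (PySem.Set String) × PySem.Dict String (PySem.Set String) :=
    g.items.foldl (fun tr p =>
      let table := tr.1.setdefault p.1 PySem.Set.empty
      ((PySem.Dict.ofList p.2).getD "productions" []).foldl (fun tr production =>
          let corner := (PySem.List.pyGet? production 0).getD ""
          (tr.1.modify p.1 PySem.Set.empty (fun st => PySem.Set.add st corner),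
           (tr.2.setdefault corner PySem.Set.empty).modify corner PySem.Set.empty
             (fun st => PySem.Set.add st p.1)))
        (table, tr.2))
      (PySem.Dict.empty, PySem.Dict.empty)
  (tr.1.items, tr.2.items)

-- ===== PRECONDITION & SPEC =====
-- Pre_ excludes exactly the inputs where Python A raises: a symbol whose dict has no
-- 'productions' key (KeyError) or an empty production (IndexError on production[0]).
def Pre_build_left_corner_table (grammar : List (String × List (String × List (List String)))) : Prop :=
  ∀ p ∈ grammar,
    ((PySem.Dict.ofList p.2 : PySem.Dict String (List (List String))).get? "productions").isSome = true ∧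
    ∀ pr ∈ (PySem.Dict.ofList p.2 : PySem.Dict String (List (List String))).getD "productions" [], pr ≠ []
instance (grammar : List (String × List (String × List (List String)))) : Decidable (Pre_build_left_corner_table grammar) := by
  unfold Pre_build_left_corner_table; infer_instance

def pvWitness_build_left_corner_table : (List (String × List (String × List (List String)))) :=
  [("S", [("productions", [["NP", "VP"], ["NP"]])]), ("NP", [("productions", [["Det", "N"], ["S"]])])]

def Spec_build_left_corner_table (grammar : List (String × List (String × List (List String)))) (out : (List (String × List String)) × (List (String × List String))) : Prop := out = build_left_corner_table_alt grammar
instance (grammar : List (String × List (String × List (List String)))) (out : (List (String × List String)) × (List (String × List String))) : Decidable (Spec_build_left_corner_table grammar out) := by unfold Spec_build_left_corner_table; infer_instance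

-- ===== CLAIM (what is proved, stated in full; the proofs are below) =====
def Claim_equal_build_left_corner_table : Prop := ∀ (grammar : List (String × List (String × List (List String)))), Dom_build_left_corner_table grammar → Pre_build_left_corner_table grammar → Spec_build_left_corner_table grammar (build_left_corner_table grammar)

-- ===== LEMMAS AND PROOFS =====

-- the reverse-table update for one (symbol s, left corner c)
def pvStepS (s : String) (r : PySem.Dict String (PySem.Set String)) (c : String) : PySem.Dict String (PySem.Set String) :=
  (if r.contains c then r else r.insert c PySem.Set.empty).modify c PySem.Set.empty (fun st => PySem.Set.add st s)

def pvCorner (pr : List String) : String := (PySem.List.pyGet? pr 0).getD ""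
def pvProds (info : List (String × List (List String))) : List (List String) :=
  (PySem.Dict.ofList info).getD "productions" []
def pvCorners (info : List (String × List (List String))) : List String := (pvProds info).map pvCorner

-- the table update for one symbol with corner list cs
def pvStepT (t : PySem.Dict String (PySem.Set String)) (s : String) (cs : List String) : PySem.Dict String (PySem.Set String) :=
  cs.foldl (fun t c => t.modify s PySem.Set.empty (fun st => PySem.Set.add st c))
    (if t.contains s then t else t.insert s PySem.Set.empty)

lemma pv_foldl_pair {α β γ : Type} (l : List α) (f : β → α → β) (g : γ → α → γ) (p : β × γ) :
    l.foldl (fun acc x => (f acc.1 x, g acc.2 x)) p = (l.foldl f p.1, l.foldl g p.2) := by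
  induction l generalizing p with
  | nil => rfl
  | cons a l ih => simp [List.foldl, ih]

lemma pv_foldl_congr {α β : Type} {l : List α} {f g : β → α → β}
    (h : ∀ b, ∀ a ∈ l, f b a = g b a) (b : β) : l.foldl f b = l.foldl g b := by
  induction l generalizing b with
  | nil => rfl
  | cons a l ih => simp only [List.foldl]; rw [h b a (by simp)]; exact ih (fun b a ha => h b a (by simp [ha])) _

lemma pv_foldl_keys_items {ν β : Type} (d : PySem.Dict String ν) (hn : d.keys.Nodup)
    (F : β → String → ν → β) (dflt : ν) (init : β) :
    d.keys.foldl (fun acc s => F acc s ((d.get? s).getD dflt)) init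
      = d.items.foldl (fun acc p => F acc p.1 p.2) init := by
  have hk : d.keys = d.items.map Prod.fst := rfl
  rw [hk, List.foldl_map]
  refine pv_foldl_congr (fun b p hp => ?_) init
  rw [PySem.Dict.get?_of_mem_items d (k := p.1) (v := p.2) (by simpa using hp) hn]
  rfl

lemma pv_set_add_of_mem {acc : List String} {c : String} (h : c ∈ acc) : PySem.Set.add acc c = acc := by
  simp [PySem.Set.add, PySem.Set.contains, h]

lemma pv_set_add_of_not_mem {acc : List String} {c : String} (h : c ∉ acc) : PySem.Set.add acc c = acc ++ [c] := by
  simp [PySem.Set.add, PySem.Set.contains, h]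

lemma pv_foldl_add_prefix (cs acc : List String) : ∃ t, cs.foldl PySem.Set.add acc = acc ++ t := by
  induction cs generalizing acc with
  | nil => exact ⟨[], by simp⟩
  | cons c cs ih =>
    by_cases hc : c ∈ acc
    · simpa [List.foldl, pv_set_add_of_mem hc] using ih acc
    · obtain ⟨t, ht⟩ := ih (acc ++ [c])
      exact ⟨c :: t, by simp [List.foldl, pv_set_add_of_not_mem hc, ht]⟩

lemma pv_stepS_noop {s : String} {r : PySem.Dict String (PySem.Set String)} {c : String}
    (hn : r.keys.Nodup) (hc : r.contains c = true) (hs : s ∈ r.getD c PySem.Set.empty) :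
    pvStepS s r c = r := by
  unfold pvStepS
  rw [if_pos hc]
  show r.insert c (PySem.Set.add (r.getD c PySem.Set.empty) s) = r
  rw [pv_set_add_of_mem hs]
  apply PySem.Dict.ext
  rw [PySem.Dict.items_insert_of_contains _ _ hc]
  have h2 : ∀ q ∈ r.items, (if (q.1 == c) = true then (c, r.getD c PySem.Set.empty) else q) = q := by
    intro q hq
    by_cases h1 : q.1 = c
    · have h3 := PySem.Dict.getD_of_mem_items r (k := q.1) (v := q.2) (by simpa using hq) hn PySem.Set.empty
      simp [h1] at h3 ⊢
      rw [h3, ← h1]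
    · simp [h1]
  rw [List.map_congr_left h2]
  exact List.map_id _

lemma pv_keys_stepS (s : String) (r : PySem.Dict String (PySem.Set String)) (c : String) :
    (pvStepS s r c).keys = if r.contains c then r.keys else r.keys ++ [c] := by
  unfold pvStepS
  by_cases hc : r.contains c
  · rw [if_pos hc, if_pos hc, PySem.Dict.keys_modify, PySem.Dict.keys_insert_of_contains _ _ hc]
  · rw [if_neg hc, if_neg (by simpa using hc), PySem.Dict.keys_modify,
      PySem.Dict.keys_insert_of_contains _ _ (by simp),
      PySem.Dict.keys_insert_of_not_contains _ _ (by simpa using hc)]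

lemma pv_nodup_stepS {s : String} {r : PySem.Dict String (PySem.Set String)} {c : String}
    (hn : r.keys.Nodup) : (pvStepS s r c).keys.Nodup := by
  rw [pv_keys_stepS]
  split
  · exact hn
  · next hc =>
    have hmem : c ∉ r.keys := fun hm => hc ((PySem.Dict.contains_iff_mem_keys r c).mpr hm)
    simp only [List.nodup_append, List.nodup_cons, List.nodup_nil, and_true]
    exact ⟨hn, by simp, fun a ha b hb => by simp at hb; exact fun h => hmem ((hb ▸ h) ▸ ha)⟩

lemma pv_contains_stepS (s : String) (r : PySem.Dict String (PySem.Set String)) (c c' : String) :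
    (pvStepS s r c).contains c' = (c' == c || r.contains c') := by
  unfold pvStepS
  by_cases hc : r.contains c
  · rw [if_pos hc, PySem.Dict.contains_modify]
  · rw [if_neg hc, PySem.Dict.contains_modify, PySem.Dict.contains_insert]
    cases h : (c' == c)
    · simp
    · simp

lemma pv_getD_stepS_of_ne {s : String} {r : PySem.Dict String (PySem.Set String)} {c c' : String}
    (h : c' ≠ c) : (pvStepS s r c).getD c' PySem.Set.empty = r.getD c' PySem.Set.empty := by
  unfold pvStepS
  by_cases hc : r.contains c
  · rw [if_pos hc, PySem.Dict.getD_modify_of_ne _ _ _ h]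
  · rw [if_neg hc, PySem.Dict.getD_modify_of_ne _ _ _ h, PySem.Dict.getD_insert]
    simp [h]

lemma pv_getD_stepS_self (s : String) (r : PySem.Dict String (PySem.Set String)) (c : String) :
    (pvStepS s r c).getD c PySem.Set.empty = PySem.Set.add (r.getD c PySem.Set.empty) s := by
  unfold pvStepS
  by_cases hc : r.contains c
  · rw [if_pos hc, PySem.Dict.getD_modify_self]
  · rw [if_neg hc, PySem.Dict.getD_modify_self, PySem.Dict.getD_insert,
      PySem.Dict.getD_of_not_contains r PySem.Set.empty (by simpa using hc)]
    simp

lemma pv_L (s : String) (cs : List String) : ∀ (acc : List String) (r : PySem.Dict String (PySem.Set String)),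
    r.keys.Nodup →
    (∀ c ∈ acc, r.contains c = true ∧ s ∈ r.getD c PySem.Set.empty) →
    cs.foldl (fun r c => pvStepS s r c) r
      = ((cs.foldl PySem.Set.add acc).drop acc.length).foldl (fun r c => pvStepS s r c) r := by
  induction cs with
  | nil => intro acc r hn hseen; simp
  | cons c cs ih =>
    intro acc r hn hseen
    by_cases hc : c ∈ acc
    · obtain ⟨h1, h2⟩ := hseen c hc
      simp only [List.foldl, pv_set_add_of_mem hc, pv_stepS_noop hn h1 h2]
      exact ih acc r hn hseen
    · simp only [List.foldl, pv_set_add_of_not_mem hc]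
      obtain ⟨t, ht⟩ := pv_foldl_add_prefix cs (acc ++ [c])
      rw [ht, List.append_assoc, List.drop_left, List.singleton_append, List.foldl_cons]
      have hseen' : ∀ c' ∈ acc ++ [c],
          (pvStepS s r c).contains c' = true ∧ s ∈ (pvStepS s r c).getD c' PySem.Set.empty := by
        intro c' hc'
        rcases List.mem_append.mp hc' with h' | h'
        · have hne : c' ≠ c := fun h => hc (h ▸ h')
          refine ⟨?_, ?_⟩
          · rw [pv_contains_stepS]; simp [(hseen c' h').1]
          · rw [pv_getD_stepS_of_ne hne]; exact (hseen c' h').2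
        · have hce : c' = c := by simpa using h'
          subst hce
          refine ⟨by rw [pv_contains_stepS]; simp, ?_⟩
          rw [pv_getD_stepS_self]
          exact (PySem.Set.mem_add _ _ _).mpr (Or.inr rfl)
      have := ih (acc ++ [c]) (pvStepS s r c) (pv_nodup_stepS hn) hseen'
      rw [this, ht, List.drop_left]

lemma pv_foldl_ofList {s : String} {cs : List String} {r : PySem.Dict String (PySem.Set String)}
    (hn : r.keys.Nodup) :
    (PySem.Set.ofList cs).foldl (fun r c => pvStepS s r c) r = cs.foldl (fun r c => pvStepS s r c) r := by
  have h := pv_L s cs [] r hn (by simp)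
  simpa [PySem.Set.ofList] using h.symm

lemma pv_nodup_foldl_stepS (s : String) (cs : List String) (r : PySem.Dict String (PySem.Set String))
    (hn : r.keys.Nodup) : (cs.foldl (fun r c => pvStepS s r c) r).keys.Nodup := by
  induction cs generalizing r with
  | nil => exact hn
  | cons c cs ih => exact ih _ (pv_nodup_stepS hn)

lemma pv_rev_chain {α : Type} (key : α → String) (vals : α → List String) (l : List α) :
    ∀ (r : PySem.Dict String (PySem.Set String)), r.keys.Nodup →
    l.foldl (fun r q => (PySem.Set.ofList (vals q)).foldl (fun r c => pvStepS (key q) r c) r) r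
      = l.foldl (fun r q => (vals q).foldl (fun r c => pvStepS (key q) r c) r) r := by
  induction l with
  | nil => intro r _; rfl
  | cons q l ih =>
    intro r hn
    simp only [List.foldl]
    rw [pv_foldl_ofList hn]
    exact ih _ (pv_nodup_foldl_stepS (key q) (vals q) r hn)

lemma pv_foldl_modify_items (s : String) (cs : List String) :
    ∀ (t : PySem.Dict String (PySem.Set String)), t.keys.Nodup → t.contains s = true →
    (cs.foldl (fun t c => t.modify s PySem.Set.empty (fun st => PySem.Set.add st c)) t).items
      = t.items.map (fun q => if q.1 = s then (s, cs.foldl PySem.Set.add q.2) else q) := by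
  induction cs with
  | nil =>
    intro t hn hc
    simp only [List.foldl]
    have h2 : ∀ q ∈ t.items, (if q.1 = s then (s, q.2) else q) = q := by
      intro q hq
      by_cases h : q.1 = s
      · simp only [h, if_pos]; rw [← h]
      · simp [h]
    rw [List.map_congr_left h2]
    exact (List.map_id _).symm
  | cons c cs ih =>
    intro t hn hc
    simp only [List.foldl]
    have hc' : (t.modify s PySem.Set.empty (fun st => PySem.Set.add st c)).contains s = true := by
      rw [PySem.Dict.contains_modify]; simp
    have hn' : (t.modify s PySem.Set.empty (fun st => PySem.Set.add st c)).keys.Nodup := by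
      rw [PySem.Dict.keys_modify, PySem.Dict.keys_insert_of_contains _ _ hc]; exact hn
    rw [ih _ hn' hc']
    have hti : (t.modify s PySem.Set.empty (fun st => PySem.Set.add st c)).items
        = t.items.map (fun q => if q.1 = s then (s, PySem.Set.add (t.getD s PySem.Set.empty) c) else q) := by
      show (t.insert s (PySem.Set.add (t.getD s PySem.Set.empty) c)).items = _
      rw [PySem.Dict.items_insert_of_contains _ _ hc]
      apply List.map_congr_left
      intro q hq
      by_cases h : q.1 = s <;> simp [h]
    rw [hti, List.map_map]
    apply List.map_congr_left
    intro q hq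
    by_cases h : q.1 = s
    · have hq2 : t.getD s ([] : PySem.Set String) = q.2 := by
        have h3 := PySem.Dict.getD_of_mem_items t (k := q.1) (v := q.2) (by simpa using hq) hn ([] : PySem.Set String)
        rw [← h]; exact h3
      simp [Function.comp, h]
      rw [hq2]
    · simp [Function.comp, h]

lemma pv_table_chain (l : List (String × List (String × List (List String)))) :
    ∀ (t : PySem.Dict String (PySem.Set String)), t.keys.Nodup →
    (∀ p ∈ l, t.contains p.1 = false) → (l.map Prod.fst).Nodup →
    (l.foldl (fun t p => pvStepT t p.1 (pvCorners p.2)) t).items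
      = t.items ++ l.map (fun p => (p.1, PySem.Set.ofList (pvCorners p.2))) := by
  induction l with
  | nil => intro t _ _ _; simp
  | cons p l ih =>
    intro t hn hfresh hl
    simp only [List.foldl, List.map]
    have hfp : t.contains p.1 = false := hfresh p (by simp)
    have hmem : p.1 ∉ t.keys := fun hm => by
      rw [(PySem.Dict.contains_iff_mem_keys t p.1).mpr hm] at hfp
      exact Bool.true_eq_false.mp hfp
    have h1 : (pvStepT t p.1 (pvCorners p.2)).items
        = t.items ++ [(p.1, PySem.Set.ofList (pvCorners p.2))] := by
      unfold pvStepT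
      rw [if_neg (by simp [hfp])]
      have hc1 : (t.insert p.1 PySem.Set.empty).contains p.1 = true := by
        rw [PySem.Dict.contains_insert]; simp
      have hn1 : (t.insert p.1 PySem.Set.empty).keys.Nodup := by
        rw [PySem.Dict.keys_insert_of_not_contains _ _ hfp]
        simp only [List.nodup_append, List.nodup_cons, List.nodup_nil, and_true]
        exact ⟨hn, by simp, fun a ha b hb => by
          simp at hb; exact fun h => hmem ((hb ▸ h) ▸ ha)⟩
      rw [pv_foldl_modify_items p.1 (pvCorners p.2) _ hn1 hc1,
        PySem.Dict.items_insert_of_not_contains _ _ hfp, List.map_append]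
      congr 1
      · have h2 : ∀ q ∈ t.items,
            (if q.1 = p.1 then (p.1, (pvCorners p.2).foldl PySem.Set.add q.2) else q) = q := by
          intro q hq
          have : q.1 ≠ p.1 := fun h =>
            hmem (h ▸ List.mem_map_of_mem (f := Prod.fst) hq)
          simp [this]
        rw [List.map_congr_left h2]
        exact List.map_id _
      · simp [PySem.Set.ofList_eq_foldl, PySem.Set.empty]
    have hk1 : (pvStepT t p.1 (pvCorners p.2)).keys = t.keys ++ [p.1] := by
      show (pvStepT t p.1 (pvCorners p.2)).items.map (fun x => x.1) = _
      rw [h1]; simp [PySem.Dict.keys]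
    have hn2 : (pvStepT t p.1 (pvCorners p.2)).keys.Nodup := by
      rw [hk1]
      simp only [List.nodup_append, List.nodup_cons, List.nodup_nil, and_true]
      exact ⟨hn, by simp, fun a ha b hb => by
        simp at hb; exact fun h => hmem ((hb ▸ h) ▸ ha)⟩
    have hfresh2 : ∀ q ∈ l, (pvStepT t p.1 (pvCorners p.2)).contains q.1 = false := by
      intro q hq
      have hne : q.1 ≠ p.1 := by
        simp only [List.map, List.nodup_cons] at hl
        exact fun h => hl.1 (h ▸ List.mem_map_of_mem (f := Prod.fst) hq)
      have hqm : q.1 ∉ (pvStepT t p.1 (pvCorners p.2)).keys := by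
        rw [hk1]
        simp only [List.mem_append, List.mem_singleton]
        rintro (h | h)
        · have : t.contains q.1 = true := (PySem.Dict.contains_iff_mem_keys t q.1).mpr h
          rw [hfresh q (by simp [hq])] at this
          exact Bool.false_eq_true.mp this
        · exact hne h
      cases h : (pvStepT t p.1 (pvCorners p.2)).contains q.1
      · rfl
      · exact absurd ((PySem.Dict.contains_iff_mem_keys _ _).mp h) hqm
    rw [ih _ hn2 hfresh2 (by simp only [List.map, List.nodup_cons] at hl; exact hl.2), h1]
    simp

-- canonical single-pass forms both ports are reduced to
def pvTableD (g : PySem.Dict String (List (String × List (List String)))) : PySem.Dict String (PySem.Set String) :=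
  g.items.foldl (fun t p => pvStepT t p.1 (pvCorners p.2)) PySem.Dict.empty

def pvRevD (g : PySem.Dict String (List (String × List (List String)))) : PySem.Dict String (PySem.Set String) :=
  g.items.foldl (fun r p => (pvCorners p.2).foldl (fun r c => pvStepS p.1 r c) r) PySem.Dict.empty

-- A's table-building step, as a function of the looked-up inner dict
def pvFT (t : PySem.Dict String (PySem.Set String)) (s : String) (info : List (String × List (List String))) : PySem.Dict String (PySem.Set String) :=
  ((PySem.Dict.ofList info).getD "productions" []).foldl
    (fun t2 production => t2.modify s PySem.Set.empty
      fun st => PySem.Set.add st ((PySem.List.pyGet? production 0).getD ""))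
    (if t.contains s then t else t.insert s PySem.Set.empty)

-- A's reverse-building step, as a function of the looked-up corner set
def pvFS (r : PySem.Dict String (PySem.Set String)) (s : String) (v : PySem.Set String) : PySem.Dict String (PySem.Set String) :=
  v.foldl (fun r c => pvStepS s r c) r

lemma pv_FT_stepT (t : PySem.Dict String (PySem.Set String)) (s : String)
    (info : List (String × List (List String))) : pvFT t s info = pvStepT t s (pvCorners info) := by
  unfold pvFT pvStepT pvCorners
  rw [List.foldl_map]
  rfl

lemma pv_stepT_setdefault (t : PySem.Dict String (PySem.Set String)) (s : String)
    (info : List (String × List (List String))) :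
    ((PySem.Dict.ofList info).getD "productions" []).foldl
      (fun t2 production => t2.modify s PySem.Set.empty
        fun st => PySem.Set.add st ((PySem.List.pyGet? production 0).getD ""))
      (t.setdefault s PySem.Set.empty)
      = pvStepT t s (pvCorners info) := by
  rw [← pv_FT_stepT]
  unfold pvFT
  by_cases h : t.contains s
  · rw [PySem.Dict.setdefault_of_contains _ _ h, if_pos h]
  · rw [PySem.Dict.setdefault_of_not_contains _ _ (by simpa using h), if_neg h]

lemma pv_stepS_setdefault (s : String) (r : PySem.Dict String (PySem.Set String)) (c : String) :
    (r.setdefault c PySem.Set.empty).modify c PySem.Set.empty (fun st => PySem.Set.add st s)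
      = pvStepS s r c := by
  unfold pvStepS
  by_cases h : r.contains c
  · rw [PySem.Dict.setdefault_of_contains _ _ h, if_pos h]
  · rw [PySem.Dict.setdefault_of_not_contains _ _ (by simpa using h), if_neg h]

lemma pv_tableD_items (grammar : List (String × List (String × List (List String)))) :
    (pvTableD (PySem.Dict.ofList grammar)).items
      = (PySem.Dict.ofList grammar).items.map (fun p => (p.1, PySem.Set.ofList (pvCorners p.2))) := by
  have h := pv_table_chain (PySem.Dict.ofList grammar).items PySem.Dict.empty
    PySem.Dict.nodup_keys_empty (fun p _ => PySem.Dict.contains_empty p.1)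
    (PySem.Dict.nodup_keys_ofList grammar)
  show ((PySem.Dict.ofList grammar).items.foldl (fun t p => pvStepT t p.1 (pvCorners p.2)) PySem.Dict.empty).items = _
  rw [h]
  rfl

lemma pv_tableD_keys (grammar : List (String × List (String × List (List String)))) :
    (pvTableD (PySem.Dict.ofList grammar)).keys = (PySem.Dict.ofList grammar).keys := by
  show (pvTableD (PySem.Dict.ofList grammar)).items.map (fun x => x.1) = (PySem.Dict.ofList grammar).items.map (fun x => x.1)
  rw [pv_tableD_items, List.map_map]
  rfl

lemma pv_A_eq (grammar : List (String × List (String × List (List String)))) :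
    build_left_corner_table grammar
      = ((pvTableD (PySem.Dict.ofList grammar)).items, (pvRevD (PySem.Dict.ofList grammar)).items) := by
  have hTab : (PySem.Dict.ofList grammar).keys.foldl
      (fun t s => pvFT t s (((PySem.Dict.ofList grammar).get? s).getD [])) PySem.Dict.empty
      = pvTableD (PySem.Dict.ofList grammar) := by
    trans ((PySem.Dict.ofList grammar).items.foldl (fun t p => pvFT t p.1 p.2) PySem.Dict.empty)
    · exact pv_foldl_keys_items _ (PySem.Dict.nodup_keys_ofList grammar) pvFT [] PySem.Dict.empty
    · exact pv_foldl_congr (fun t p _ => pv_FT_stepT t p.1 p.2) PySem.Dict.empty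
  have hTAnodup : (pvTableD (PySem.Dict.ofList grammar)).keys.Nodup := by
    rw [pv_tableD_keys]; exact PySem.Dict.nodup_keys_ofList grammar
  have hRev : (pvTableD (PySem.Dict.ofList grammar)).keys.foldl
      (fun r s => pvFS r s (((pvTableD (PySem.Dict.ofList grammar)).get? s).getD PySem.Set.empty))
      PySem.Dict.empty
      = pvRevD (PySem.Dict.ofList grammar) := by
    trans ((pvTableD (PySem.Dict.ofList grammar)).items.foldl (fun r p => pvFS r p.1 p.2) PySem.Dict.empty)
    · exact pv_foldl_keys_items _ hTAnodup pvFS PySem.Set.empty PySem.Dict.empty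
    · rw [pv_tableD_items, List.foldl_map]
      exact pv_rev_chain (fun p => p.1) (fun p => pvCorners p.2) (PySem.Dict.ofList grammar).items
        PySem.Dict.empty PySem.Dict.nodup_keys_empty
  show (((PySem.Dict.ofList grammar).keys.foldl
          (fun t s => pvFT t s (((PySem.Dict.ofList grammar).get? s).getD [])) PySem.Dict.empty).items,
        (((PySem.Dict.ofList grammar).keys.foldl
            (fun t s => pvFT t s (((PySem.Dict.ofList grammar).get? s).getD [])) PySem.Dict.empty).keys.foldl
          (fun r s => pvFS r s ((((PySem.Dict.ofList grammar).keys.foldl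
              (fun t s => pvFT t s (((PySem.Dict.ofList grammar).get? s).getD [])) PySem.Dict.empty).get? s).getD
              PySem.Set.empty))
          PySem.Dict.empty).items) = _
  rw [hTab, hRev]

lemma pv_B_eq (grammar : List (String × List (String × List (List String)))) :
    build_left_corner_table_alt grammar
      = ((pvTableD (PySem.Dict.ofList grammar)).items, (pvRevD (PySem.Dict.ofList grammar)).items) := by
  have hsplit : ∀ (tr : PySem.Dict String (PySem.Set String) × PySem.Dict String (PySem.Set String)),
      ∀ p ∈ (PySem.Dict.ofList grammar).items,
      (((PySem.Dict.ofList p.2).getD "productions" []).foldl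
        (fun tr2 production =>
          ((tr2.1.modify p.1 PySem.Set.empty
              fun st => PySem.Set.add st ((PySem.List.pyGet? production 0).getD "")),
           ((tr2.2.setdefault ((PySem.List.pyGet? production 0).getD "") PySem.Set.empty).modify
              ((PySem.List.pyGet? production 0).getD "") PySem.Set.empty
              fun st => PySem.Set.add st p.1)))
        (tr.1.setdefault p.1 PySem.Set.empty, tr.2))
      = (pvStepT tr.1 p.1 (pvCorners p.2), (pvCorners p.2).foldl (fun r c => pvStepS p.1 r c) tr.2) := by
    intro tr p _
    rw [pv_foldl_pair ((PySem.Dict.ofList p.2).getD "productions" [])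
      (fun t production => t.modify p.1 PySem.Set.empty
        fun st => PySem.Set.add st ((PySem.List.pyGet? production 0).getD ""))
      (fun r production => (r.setdefault ((PySem.List.pyGet? production 0).getD "") PySem.Set.empty).modify
        ((PySem.List.pyGet? production 0).getD "") PySem.Set.empty
        fun st => PySem.Set.add st p.1)
      (tr.1.setdefault p.1 PySem.Set.empty, tr.2)]
    rw [Prod.mk.injEq]
    refine ⟨pv_stepT_setdefault tr.1 p.1 p.2, ?_⟩
    trans ((pvProds p.2).foldl (fun r production => pvStepS p.1 r (pvCorner production)) tr.2)
    · exact pv_foldl_congr (fun r pr _ => pv_stepS_setdefault p.1 r (pvCorner pr)) tr.2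
    · exact List.foldl_map.symm
  calc build_left_corner_table_alt grammar
      = ((fun tr : PySem.Dict String (PySem.Set String) × PySem.Dict String (PySem.Set String) =>
            (tr.1.items, tr.2.items))
          ((PySem.Dict.ofList grammar).items.foldl
            (fun tr p => (pvStepT tr.1 p.1 (pvCorners p.2),
                          (pvCorners p.2).foldl (fun r c => pvStepS p.1 r c) tr.2))
            (PySem.Dict.empty, PySem.Dict.empty))) :=
        congrArg (fun tr : PySem.Dict String (PySem.Set String) × PySem.Dict String (PySem.Set String) =>
            (tr.1.items, tr.2.items))
          (pv_foldl_congr hsplit (PySem.Dict.empty, PySem.Dict.empty))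
    _ = ((pvTableD (PySem.Dict.ofList grammar)).items, (pvRevD (PySem.Dict.ofList grammar)).items) :=
        congrArg (fun tr : PySem.Dict String (PySem.Set String) × PySem.Dict String (PySem.Set String) =>
            (tr.1.items, tr.2.items))
          (pv_foldl_pair (PySem.Dict.ofList grammar).items
            (fun t p => pvStepT t p.1 (pvCorners p.2))
            (fun r p => (pvCorners p.2).foldl (fun r c => pvStepS p.1 r c) r)
            (PySem.Dict.empty, PySem.Dict.empty))

-- ===== VERDICT (by name: the statement is the Claim_ definition above) =====
theorem build_left_corner_table_spec : Claim_equal_build_left_corner_table := by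
  intro grammar _ _
  show build_left_corner_table grammar = build_left_corner_table_alt grammar
  rw [pv_A_eq, pv_B_eq]
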